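-- pv_equiv track=rewrite | github.com/ztucker4/Jig-Machine | jigMachine.py | makeNotesList
-- ===== SOURCE A (Python) =====
-- def makeNotesList(string):
--     notesList = []
--     lengths = ["2", "3", "4", "5", "6"]
--     accidentals = ["^", "=", "_"]
--     while len(string) > 3:
--         if string[0] in accidentals:
--             if string[2] in lengths: #ANL
--                 notesList.append(string[0:3])
--                 string = string[3:]
--             else: #AN N
--                 notesList.append(string[0:2])
--                 string = string[2:]
--         else:
--             if string[1] in lengths: #NL
--                 notesList.append(string[0:2])
--                 string = string[2:]
--             else: #N N
--                 notesList.append(string[0])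
--                 string = string[1:]
--     return notesList
-- ===== SOURCE B (Python) =====
-- def tokenize(string):
--     """Greedily split the whole string into tokens: optional accidental,
--     one arbitrary character, optional length digit.  Yields (start, token)."""
--     n = len(string)
--     i = 0
--     while i < n:
--         j = i
--         if string[j] in "^=_" and j + 1 < n:
--             j += 1
--         j += 1
--         if j < n and string[j] in "23456":
--             j += 1
--         yield i, string[i:j]
--         i = j
--
-- def makeNotesList(string):
--     n = len(string)
--     return [tok for s, tok in tokenize(string) if n - s > 3]
-- ===== Notes on version B (the rewrite author's own statement) =====
-- stated objective: faster
-- what changed: A repeatedly re-slices the remaining string while consuming one token per iteration and stops when at most 3 characters remain; B tokenizes the whole string once with a single-pass generator yielding (start, token) spans and then keeps a token exactly when len(string) - start > 3, so the quadratic re-slicing disappears.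
import Mathlib
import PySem

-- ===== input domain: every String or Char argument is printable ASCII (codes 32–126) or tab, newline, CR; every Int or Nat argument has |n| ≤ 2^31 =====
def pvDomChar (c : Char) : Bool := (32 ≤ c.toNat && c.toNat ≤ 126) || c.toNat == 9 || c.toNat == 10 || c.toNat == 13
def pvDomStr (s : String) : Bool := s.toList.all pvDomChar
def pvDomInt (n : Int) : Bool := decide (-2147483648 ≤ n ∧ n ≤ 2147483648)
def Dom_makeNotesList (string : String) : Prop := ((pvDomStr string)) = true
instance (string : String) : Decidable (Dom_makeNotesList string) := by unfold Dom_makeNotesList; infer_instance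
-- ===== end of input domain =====

-- B replaces A's consume-and-reslice while-loop by a single-pass tokenizer of the whole
-- string (yielding (start, token) spans like a regex finditer) followed by a positional
-- filter n - start > 3; avoiding the repeated slicing makes B linear where A is quadratic.


-- ===== PORT A =====
-- A's loop: while len(string) > 3, peel an accidental?/note/length? token off the front.
-- Ported on List Char (string[0:k] / string[k:] become take/drop, spelt as explicit cons
-- patterns); membership of the 1-char string in the lists is char membership.
def pvAccidentals : List Char := ['^', '=', '_']
def pvLengths : List Char := ['2', '3', '4', '5', '6']

def makeNotesListGo : List Char → List String
  | c0 :: c1 :: c2 :: c3 :: rest =>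
    if c0 ∈ pvAccidentals then
      if c2 ∈ pvLengths then -- ANL
        String.ofList [c0, c1, c2] :: makeNotesListGo (c3 :: rest)
      else -- AN N
        String.ofList [c0, c1] :: makeNotesListGo (c2 :: c3 :: rest)
    else
      if c1 ∈ pvLengths then -- NL
        String.ofList [c0, c1] :: makeNotesListGo (c2 :: c3 :: rest)
      else -- N N
        String.ofList [c0] :: makeNotesListGo (c1 :: c2 :: c3 :: rest)
  | _ => []  -- len(string) <= 3: loop exits

def makeNotesList (string : String) : List String :=
  makeNotesListGo string.toList

-- ===== PORT B =====
-- Source B's tokenize(): scan the WHOLE string once, yielding (start, token) where a token is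
-- optional accidental (only if a char follows) + one char + optional length digit.
def tokensB : List Char → Nat → List (Nat × List Char)
  | [], _ => []
  | [c], i => [(i, [c])]
  | [c0, c1], i =>
    -- accidental is consumed only when a character follows (j + 1 < n)
    if c0 ∈ pvAccidentals then [(i, [c0, c1])]
    else if c1 ∈ pvLengths then [(i, [c0, c1])]
    else (i, [c0]) :: tokensB [c1] (i + 1)
  | c0 :: c1 :: r0 :: rtail, i =>
    if c0 ∈ pvAccidentals then
      if r0 ∈ pvLengths then (i, [c0, c1, r0]) :: tokensB rtail (i + 3)
      else (i, [c0, c1]) :: tokensB (r0 :: rtail) (i + 2)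
    else if c1 ∈ pvLengths then (i, [c0, c1]) :: tokensB (r0 :: rtail) (i + 2)
    else (i, [c0]) :: tokensB (c1 :: r0 :: rtail) (i + 1)
termination_by cs _ => cs.length
decreasing_by all_goals (simp; try omega)

-- Source B: [tok for s, tok in tokenize(string) if n - s > 3]
def makeNotesList_alt (string : String) : List String :=
  let n := string.toList.length
  ((tokensB string.toList 0).filter (fun p => decide (3 < n - p.1))).map
    (fun p => String.ofList p.2)

-- ===== PRECONDITION & SPEC =====
def Spec_makeNotesList (string : String) (out : List String) : Prop := out = makeNotesList_alt string
instance (string : String) (out : List String) : Decidable (Spec_makeNotesList string out) := by unfold Spec_makeNotesList; infer_instance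

-- ===== CLAIM (what is proved, stated in full; the proofs are below) =====
def Claim_equal_makeNotesList : Prop := ∀ (string : String), Dom_makeNotesList string → Spec_makeNotesList string (makeNotesList string)

-- ===== LEMMAS AND PROOFS =====

-- every token start produced from index i is ≥ i
theorem tokensB_start_le (cs : List Char) (i : Nat) :
    ∀ p ∈ tokensB cs i, i ≤ p.1 := by
  match cs with
  | [] => simp [tokensB]
  | [c] => simp [tokensB]
  | [c0, c1] =>
    intro p hp
    simp only [tokensB] at hp
    split_ifs at hp
    · simp_all
    · simp_all
    · rcases List.mem_cons.mp hp with h | h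
      · simp [h]
      · simp_all
  | c0 :: c1 :: r0 :: rtail =>
    intro p hp
    simp only [tokensB] at hp
    split_ifs at hp
    · rcases List.mem_cons.mp hp with h | h
      · simp [h]
      · exact le_trans (by omega) (tokensB_start_le rtail (i + 3) p h)
    · rcases List.mem_cons.mp hp with h | h
      · simp [h]
      · exact le_trans (by omega) (tokensB_start_le (r0 :: rtail) (i + 2) p h)
    · rcases List.mem_cons.mp hp with h | h
      · simp [h]
      · exact le_trans (by omega) (tokensB_start_le (r0 :: rtail) (i + 2) p h)
    · rcases List.mem_cons.mp hp with h | h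
      · simp [h]
      · exact le_trans (by omega) (tokensB_start_le (c1 :: r0 :: rtail) (i + 1) p h)
termination_by cs.length

-- once fewer than 4 characters remain past index i, the filter drops everything
theorem filter_tokensB_tail (cs : List Char) (i n : Nat) (h : n ≤ i + 3) :
    (tokensB cs i).filter (fun p => decide (3 < n - p.1)) = [] := by
  rw [List.filter_eq_nil_iff]
  intro p hp
  have := tokensB_start_le cs i p hp
  simp only [decide_eq_true_eq]
  omega

theorem main_lemma (cs : List Char) (i n : Nat) (h : n = i + cs.length) :
    ((tokensB cs i).filter (fun p => decide (3 < n - p.1))).map (fun p => String.ofList p.2)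
      = makeNotesListGo cs := by
  match cs with
  | c0 :: c1 :: c2 :: c3 :: rest =>
    have hlen : (3 : Nat) < n - i := by simp only [List.length_cons] at h; omega
    by_cases hacc : c0 ∈ pvAccidentals
    · by_cases hl : c2 ∈ pvLengths
      · have ih := main_lemma (c3 :: rest) (i + 3) n (by simp only [List.length_cons] at h ⊢; omega)
        simp only [tokensB, if_pos hacc, if_pos hl, List.filter_cons, decide_eq_true_eq,
          if_pos hlen, List.map_cons, makeNotesListGo] at ih ⊢
        rw [ih]
      · have ih := main_lemma (c2 :: c3 :: rest) (i + 2) n (by simp only [List.length_cons] at h ⊢; omega)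
        simp only [tokensB, if_pos hacc, if_neg hl, List.filter_cons, decide_eq_true_eq,
          if_pos hlen, List.map_cons, makeNotesListGo] at ih ⊢
        rw [ih]
    · by_cases hl : c1 ∈ pvLengths
      · have ih := main_lemma (c2 :: c3 :: rest) (i + 2) n (by simp only [List.length_cons] at h ⊢; omega)
        simp only [tokensB, if_neg hacc, if_pos hl, List.filter_cons, decide_eq_true_eq,
          if_pos hlen, List.map_cons, makeNotesListGo] at ih ⊢
        rw [ih]
      · have ih := main_lemma (c1 :: c2 :: c3 :: rest) (i + 1) n (by simp only [List.length_cons] at h ⊢; omega)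
        simp only [tokensB, if_neg hacc, if_neg hl, List.filter_cons, decide_eq_true_eq,
          if_pos hlen, List.map_cons, makeNotesListGo] at ih ⊢
        rw [ih]
  | [] =>
    rw [filter_tokensB_tail _ i n (by simp only [List.length_nil] at h; omega)]; simp [makeNotesListGo]
  | [c] =>
    rw [filter_tokensB_tail _ i n (by simp only [List.length_cons, List.length_nil] at h; omega)]; simp [makeNotesListGo]
  | [c0, c1] =>
    rw [filter_tokensB_tail _ i n (by simp only [List.length_cons, List.length_nil] at h; omega)]; simp [makeNotesListGo]
  | [c0, c1, c2] =>
    rw [filter_tokensB_tail _ i n (by simp only [List.length_cons, List.length_nil] at h; omega)]; simp [makeNotesListGo]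
termination_by cs.length

-- ===== VERDICT (by name: the statement is the Claim_ definition above) =====
theorem makeNotesList_spec : Claim_equal_makeNotesList := by
  intro s _
  unfold Spec_makeNotesList makeNotesList makeNotesList_alt
  exact (main_lemma s.toList 0 s.toList.length (by omega)).symm
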